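-- pv_equiv track=rewrite | github.com/footprinthere/leetcode | 06/package_1889.py | calculate_wasted
-- ===== SOURCE A (Python) =====
-- def calculate_wasted(packages: list[int], supplier: list[int]) -> int:
--     """ packages와 supplier는 모두 정렬된 상태여야 함 """
--
--     if packages[-1] > supplier[-1]:
--         return -1   # impossible
--
--     result = 0
--     idx = 0
--
--     for box in supplier:
--         if idx >= len(packages) or box < packages[idx]:
--             continue    # 사용할 수 없는 박스
--
--         limit = binary_search(packages, start=idx, target=box)
--         result += (limit - idx + 1) * box   # 박스 용량만 계산
--
--         idx = limit + 1
--
--     return result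
--
-- def binary_search(arr: list[int], start: int, target: int) -> int:
--     end = len(arr) - 1
--
--     while start < end:
--         mid = start + (end - start + 1) // 2    # 길이가 짝수이면 항상 오른쪽을 선택
--
--         if arr[mid] <= target:
--             start = mid     # inclusive
--         else:
--             end = mid - 1
--
--     return start
-- ===== SOURCE B (Python) =====
-- def calculate_wasted(packages: list[int], supplier: list[int]) -> int:
--     """ packages와 supplier는 모두 정렬된 상태여야 함 """
--
--     if packages[-1] > supplier[-1]:
--         return -1   # impossible
--
--     result = 0
--     idx = 0
--     n = len(packages)
--
--     for box in supplier:
--         start = idx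
--         while idx < n and packages[idx] <= box:
--             idx += 1
--         result += (idx - start) * box
--
--     return result
-- ===== Notes on version B (the rewrite author's own statement) =====
-- stated objective: simpler
-- what changed: Replaces the binary-search helper and the per-box skip guard with a single two-pointer sweep: one index over packages advances linearly, consuming every package the current box can hold, so the helper function disappears.
-- outside the precondition, e.g. on calculate_wasted([0, 3, 1, 1], [2]): A returns 8, B returns 2
import Mathlib
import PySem

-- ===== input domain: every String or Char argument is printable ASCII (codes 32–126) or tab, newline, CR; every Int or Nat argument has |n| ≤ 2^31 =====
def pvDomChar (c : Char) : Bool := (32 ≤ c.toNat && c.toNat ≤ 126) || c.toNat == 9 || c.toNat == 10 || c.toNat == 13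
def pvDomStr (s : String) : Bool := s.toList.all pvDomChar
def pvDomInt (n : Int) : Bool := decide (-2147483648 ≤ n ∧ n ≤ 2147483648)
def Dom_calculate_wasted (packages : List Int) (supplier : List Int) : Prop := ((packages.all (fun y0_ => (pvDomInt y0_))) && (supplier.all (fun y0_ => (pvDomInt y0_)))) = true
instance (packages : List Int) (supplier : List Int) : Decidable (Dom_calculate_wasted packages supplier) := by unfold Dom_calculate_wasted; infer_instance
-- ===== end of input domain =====

-- B replaces A's per-box binary search (and its helper function) with a single two-pointer sweep
-- over packages, a simpler decomposition; return values agree on the documented sorted domain.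

-- ===== PORT A =====
-- binary_search's while loop, fuel-bounded (fuel = arr.length always suffices; each step shrinks end-start)
def pyBsGo (arr : List Int) (target : Int) : Int → Int → Nat → Int
  | start, _, 0 => start
  | start, endd, fuel+1 =>
    if start < endd then
      let mid := start + PySem.Int.floordiv (endd - start + 1) 2
      if (PySem.List.pyGet? arr mid).getD 0 ≤ target then pyBsGo arr target mid endd fuel
      else pyBsGo arr target start (mid - 1) fuel
    else start

def binary_search (arr : List Int) (start : Int) (target : Int) : Int :=
  pyBsGo arr target start ((arr.length : Int) - 1) arr.length

def calculate_wasted (packages : List Int) (supplier : List Int) : Int :=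
  match PySem.List.pyGet? packages (-1), PySem.List.pyGet? supplier (-1) with
  | some pLast, some sLast =>
    if pLast > sLast then -1
    else
      (supplier.foldl (fun (st : Int × Int) box =>
        if st.2 ≥ (packages.length : Int) ∨ box < (PySem.List.pyGet? packages st.2).getD 0 then
          st   -- continue: unusable box
        else
          let limit := binary_search packages st.2 box
          (st.1 + (limit - st.2 + 1) * box, limit + 1)) (0, 0)).1
  | _, _ => 0  -- IndexError (empty list) in Python; excluded by Pre_

-- ===== PORT B =====
-- the inner while loop of Source B, fuel-bounded (fuel = packages.length suffices since 0 ≤ idx)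
def sweepIdx (packages : List Int) (box : Int) : Int → Nat → Int
  | idx, 0 => idx
  | idx, fuel+1 =>
    if idx < (packages.length : Int) ∧ (PySem.List.pyGet? packages idx).getD 0 ≤ box then
      sweepIdx packages box (idx + 1) fuel
    else idx

def calculate_wasted_alt (packages : List Int) (supplier : List Int) : Int :=
  match PySem.List.pyGet? packages (-1) with
  | none => 0  -- IndexError (empty list) in Python; excluded by Pre_
  | some pLast =>
    match PySem.List.pyGet? supplier (-1) with
    | none => 0  -- IndexError (empty list) in Python; excluded by Pre_
    | some sLast =>
      if pLast > sLast then -1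
      else
        (supplier.foldl (fun (st : Int × Int) box =>
          let j := sweepIdx packages box st.2 packages.length
          (st.1 + (j - st.2) * box, j)) (0, 0)).1

-- ===== PRECONDITION & SPEC =====
-- Pre_ excludes empty packages/supplier (A raises IndexError, so does B) and unsorted packages
-- that pass the -1 guard: the function's docstring requires sorted input, and on unsorted packages
-- A's binary-search result is meaningless (guard-failing inputs are kept: both return -1 there).
def Pre_calculate_wasted (packages : List Int) (supplier : List Int) : Prop :=
  packages ≠ [] ∧ supplier ≠ [] ∧
    (List.Pairwise (· ≤ ·) packages ∨ supplier.getLast?.getD 0 < packages.getLast?.getD 0)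
instance (packages : List Int) (supplier : List Int) : Decidable (Pre_calculate_wasted packages supplier) := by unfold Pre_calculate_wasted; infer_instance

def pvWitness_calculate_wasted : List Int × List Int := ([1, 2, 3, 5], [2, 4, 6])

def Spec_calculate_wasted (packages : List Int) (supplier : List Int) (out : Int) : Prop := out = calculate_wasted_alt packages supplier
instance (packages : List Int) (supplier : List Int) (out : Int) : Decidable (Spec_calculate_wasted packages supplier out) := by unfold Spec_calculate_wasted; infer_instance

-- ===== CLAIM (what is proved, stated in full; the proofs are below) =====
def Claim_equal_calculate_wasted : Prop := ∀ (packages : List Int) (supplier : List Int), Dom_calculate_wasted packages supplier → Pre_calculate_wasted packages supplier → Spec_calculate_wasted packages supplier (calculate_wasted packages supplier)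

-- ===== LEMMAS AND PROOFS =====

-- abbreviation used only in the proofs: the int-indexed element with default 0
def pvGet (arr : List Int) (i : Int) : Int := (PySem.List.pyGet? arr i).getD 0

-- monotonicity of pvGet on a sorted list
lemma pvGet_mono {arr : List Int} (hs : List.Pairwise (· ≤ ·) arr)
    {i j : Int} (h0 : 0 ≤ i) (hij : i ≤ j) (hj : j < (arr.length : Int)) :
    pvGet arr i ≤ pvGet arr j := by
  have hi0 : 0 ≤ j := le_trans h0 hij
  unfold pvGet
  rw [PySem.List.pyGet?_of_nonneg arr h0, PySem.List.pyGet?_of_nonneg arr hi0]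
  have hjn : j.toNat < arr.length := by omega
  have hin : i.toNat < arr.length := by omega
  rw [List.getElem?_eq_getElem hin, List.getElem?_eq_getElem hjn]
  simp only [Option.getD_some]
  rcases eq_or_lt_of_le hij with h | h
  · simp [h]
  · exact List.Pairwise.rel_get_of_lt hs (by simpa using (by omega : i.toNat < j.toNat))

-- postcondition of the sweep loop (no sortedness needed)
lemma sweep_spec (arr : List Int) (box : Int) :
    ∀ (fuel : Nat) (idx : Int), 0 ≤ idx → idx ≤ (arr.length : Int) →
    (arr.length : Int) - idx ≤ (fuel : Int) →
    let q := sweepIdx arr box idx fuel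
    idx ≤ q ∧ q ≤ (arr.length : Int) ∧
      (∀ i, idx ≤ i → i < q → pvGet arr i ≤ box) ∧
      (q = (arr.length : Int) ∨ box < pvGet arr q) := by
  intro fuel
  induction fuel with
  | zero =>
    intro idx h0 hle hf
    simp only [sweepIdx]
    refine ⟨le_refl _, hle, fun i h1 h2 => absurd h2 (by omega), Or.inl (by omega)⟩
  | succ f ih =>
    intro idx h0 hle hf
    simp only [sweepIdx]
    by_cases hc : idx < (arr.length : Int) ∧ (PySem.List.pyGet? arr idx).getD 0 ≤ box
    · simp only [if_pos hc]
      obtain ⟨hq1, hq2, hq3, hq4⟩ := ih (idx + 1) (by omega) (by omega) (by omega)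
      refine ⟨by omega, hq2, ?_, hq4⟩
      intro i h1 h2
      rcases eq_or_lt_of_le h1 with h | h
      · exact h ▸ hc.2
      · exact hq3 i (by omega) h2
    · simp only [if_neg hc]
      refine ⟨le_refl _, by omega, fun i h1 h2 => absurd h2 (by omega), ?_⟩
      by_cases hl : idx < (arr.length : Int)
      · right; push Not at hc; exact hc hl
      · left; omega

-- postcondition of the binary-search loop (no sortedness needed)
lemma bs_spec (arr : List Int) (target : Int) :
    ∀ (fuel : Nat) (start endd : Int), 0 ≤ start → start ≤ endd →
    endd ≤ (arr.length : Int) - 1 → endd - start < (fuel : Int) →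
    pvGet arr start ≤ target →
    (endd = (arr.length : Int) - 1 ∨ target < pvGet arr (endd + 1)) →
    let p := pyBsGo arr target start endd fuel
    start ≤ p ∧ p ≤ endd ∧ pvGet arr p ≤ target ∧
      (p = (arr.length : Int) - 1 ∨ target < pvGet arr (p + 1)) := by
  intro fuel
  induction fuel with
  | zero => intro start endd h0 hse hel hf; omega
  | succ f ih =>
    intro start endd h0 hse hel hf hstart hend
    simp only [pyBsGo]
    by_cases hlt : start < endd
    · simp only [if_pos hlt]
      have hmid1 : 1 ≤ PySem.Int.floordiv (endd - start + 1) 2 := by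
        rw [PySem.Int.le_floordiv_iff_mul_le (by omega)]; omega
      have hmid2 : PySem.Int.floordiv (endd - start + 1) 2 ≤ endd - start := by
        have := PySem.Int.floordiv_lt_iff_lt_mul (a := endd - start + 1) (b := 2)
          (q := endd - start + 1) (by omega)
        omega
      by_cases hc : (PySem.List.pyGet? arr (start + PySem.Int.floordiv (endd - start + 1) 2)).getD 0 ≤ target
      · simp only [if_pos hc]
        exact match ih (start + PySem.Int.floordiv (endd - start + 1) 2) endd (by omega)
          (by omega) hel (by omega) hc hend with
        | ⟨a, b, c, d⟩ => ⟨by omega, b, c, d⟩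
      · simp only [if_neg hc]
        push Not at hc
        exact match ih start (start + PySem.Int.floordiv (endd - start + 1) 2 - 1) h0
          (by omega) (by omega) (by omega) hstart (by right; simpa using hc) with
        | ⟨a, b, c, d⟩ => ⟨a, by omega, c, d⟩
    · simp only [if_neg hlt]
      exact ⟨le_refl _, by omega, hstart, by
        rcases hend with h | h
        · left; omega
        · right; have : endd = start := by omega
          exact this ▸ h⟩

-- one step of the two folds produces the same state (packages sorted)
lemma step_eq (packages : List Int) (hs : List.Pairwise (· ≤ ·) packages)
    (st : Int × Int) (box : Int) (h0 : 0 ≤ st.2) (hn : st.2 ≤ (packages.length : Int)) :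
    (if st.2 ≥ (packages.length : Int) ∨ box < (PySem.List.pyGet? packages st.2).getD 0 then st
     else
       let limit := binary_search packages st.2 box
       (st.1 + (limit - st.2 + 1) * box, limit + 1))
    = (st.1 + (sweepIdx packages box st.2 packages.length - st.2) * box,
        sweepIdx packages box st.2 packages.length) := by
  obtain ⟨hq1, hq2, hq3, hq4⟩ :=
    sweep_spec packages box packages.length st.2 h0 hn (by omega)
  by_cases hc : st.2 ≥ (packages.length : Int) ∨ box < (PySem.List.pyGet? packages st.2).getD 0
  · simp only [if_pos hc]
    have hq : sweepIdx packages box st.2 packages.length = st.2 := by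
      by_contra hne
      have hlt : st.2 < sweepIdx packages box st.2 packages.length := by omega
      have := hq3 st.2 (le_refl _) hlt
      unfold pvGet at this
      rcases hc with h | h
      · omega
      · omega
    rw [hq]; simp
  · simp only [if_neg hc]
    push Not at hc
    obtain ⟨hlen, hfit⟩ := hc
    obtain ⟨hp1, hp2, hp3, hp4⟩ :=
      bs_spec packages box packages.length st.2 ((packages.length : Int) - 1) h0
        (by omega) (by omega) (by omega) hfit (Or.inl rfl)
    set p := pyBsGo packages box st.2 ((packages.length : Int) - 1) packages.length with hpdef
    set q := sweepIdx packages box st.2 packages.length with hqdef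
    have hqp : q = p + 1 := by
      have hqle : q ≤ p + 1 := by
        rcases hp4 with h | h
        · omega
        · by_contra hgt
          have := hq3 (p + 1) (by omega) (by omega)
          omega
      have hqgt : p < q := by
        by_contra hle
        rcases hq4 with h | h
        · omega
        · have := pvGet_mono hs (i := q) (j := p) (by omega) (by omega) (by omega)
          omega
      omega
    simp only [binary_search, ← hpdef, hqp]
    rw [Prod.mk.injEq]
    exact ⟨by ring, rfl⟩

-- the two folds agree from any well-formed state
lemma fold_eq (packages : List Int) (hs : List.Pairwise (· ≤ ·) packages) :
    ∀ (sup : List Int) (st : Int × Int), 0 ≤ st.2 → st.2 ≤ (packages.length : Int) →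
    (sup.foldl (fun (st : Int × Int) box =>
        if st.2 ≥ (packages.length : Int) ∨ box < (PySem.List.pyGet? packages st.2).getD 0 then st
        else
          let limit := binary_search packages st.2 box
          (st.1 + (limit - st.2 + 1) * box, limit + 1)) st)
    = (sup.foldl (fun (st : Int × Int) box =>
        let j := sweepIdx packages box st.2 packages.length
        (st.1 + (j - st.2) * box, j)) st) := by
  intro sup
  induction sup with
  | nil => intro st _ _; rfl
  | cons box rest ih =>
    intro st h0 hn
    simp only [List.foldl_cons]
    rw [step_eq packages hs st box h0 hn]
    obtain ⟨hq1, hq2, _, _⟩ := sweep_spec packages box packages.length st.2 h0 hn (by omega)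
    exact ih _ (by omega) hq2

-- ===== VERDICT (by name: the statement is the Claim_ definition above) =====
theorem calculate_wasted_spec : Claim_equal_calculate_wasted := by
  intro packages supplier _ hpre
  obtain ⟨hp, hsup, hs⟩ := hpre
  unfold Spec_calculate_wasted calculate_wasted calculate_wasted_alt
  rw [PySem.List.pyGet?_neg_one, PySem.List.pyGet?_neg_one]
  obtain ⟨pLast, hpl⟩ := List.getLast?_isSome.mpr hp |> Option.isSome_iff_exists.mp
  obtain ⟨sLast, hsl⟩ := List.getLast?_isSome.mpr hsup |> Option.isSome_iff_exists.mp
  rw [hpl, hsl]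
  by_cases hguard : pLast > sLast
  · simp [hguard]
  · simp only [if_neg hguard]
    have hsorted : List.Pairwise (· ≤ ·) packages := by
      rcases hs with h | h
      · exact h
      · rw [hpl, hsl] at h; simp only [Option.getD_some] at h; omega
    rw [fold_eq packages hsorted supplier (0, 0) (by norm_num) (by positivity)]
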